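-- pv_equiv track=rewrite | github.com/kimsangwan84/hdl_tools | generator/iomux/utils.py | gpio_like_port_entries
-- ===== SOURCE A (Python) =====
-- from typing import Any, Dict, List, Optional, Set, Tuple
--
-- def sv_id(s: str) -> str:
--     return "".join(ch if (ch.isalnum() or ch in "_$[]") else "_" for ch in s)
--
-- GPIO_BOOL = ("oen", "i", "pe_pu", "ps_pd", "st", "ie")
--
-- def gpio_like_port_entries(base: str, width: int) -> List[Dict[str, str]]:
--     b = sv_id(base)
--     ent = []
--     for nm in GPIO_BOOL:
--         ent.append(
--             {
--                 "direction": "input",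
--                 "type": "logic",
--                 "bits": ("" if width <= 1 else f"[{width-1}:0]"),
--                 "name": f"{b}_{nm}",
--                 "array": "",
--                 "iface": "",
--             }
--         )
--     ent.append(
--         {
--             "direction": "input",
--             "type": "logic",
--             "bits": ("" if width <= 1 else f"[{width-1}:0]") + "[3:0]",
--             "name": f"{b}_ds",
--             "array": "",
--             "iface": "",
--         }
--     )
--     ent.append(
--         {
--             "direction": "output",
--             "type": "logic",
--             "bits": ("" if width <= 1 else f"[{width-1}:0]"),
--             "name": f"{b}_c",
--             "array": "",
--             "iface": "",
--         }
--     )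
--     return ent
-- ===== SOURCE B (Python) =====
-- _KEYS = ("direction", "type", "bits", "name", "array", "iface")
-- _SUFFIXES = ["oen", "i", "pe_pu", "ps_pd", "st", "ie", "ds", "c"]
--
--
-- def gpio_like_port_entries(base, width):
--     b = "".join(ch if (ch.isalnum() or ch in "_$[]") else "_" for ch in base)
--     bits = "" if width <= 1 else f"[{width-1}:0]"
--     # columnar construction: one parallel list per field, zipped into rows
--     directions = ["input"] * 7 + ["output"]
--     bits_col = [bits] * 6 + [bits + "[3:0]", bits]
--     names = [f"{b}_{s}" for s in _SUFFIXES]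
--     return [
--         dict(zip(_KEYS, (d, "logic", bt, nm, "", "")))
--         for d, bt, nm in zip(directions, bits_col, names)
--     ]
-- ===== Notes on version B (the rewrite author's own statement) =====
-- stated objective: alternative
-- what changed: Row-wise construction (loop plus two hand-written appends) is replaced by a columnar build: one parallel list per field (directions, bits, names) computed independently and then zipped with the key tuple into the eight row dicts.
import Mathlib
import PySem

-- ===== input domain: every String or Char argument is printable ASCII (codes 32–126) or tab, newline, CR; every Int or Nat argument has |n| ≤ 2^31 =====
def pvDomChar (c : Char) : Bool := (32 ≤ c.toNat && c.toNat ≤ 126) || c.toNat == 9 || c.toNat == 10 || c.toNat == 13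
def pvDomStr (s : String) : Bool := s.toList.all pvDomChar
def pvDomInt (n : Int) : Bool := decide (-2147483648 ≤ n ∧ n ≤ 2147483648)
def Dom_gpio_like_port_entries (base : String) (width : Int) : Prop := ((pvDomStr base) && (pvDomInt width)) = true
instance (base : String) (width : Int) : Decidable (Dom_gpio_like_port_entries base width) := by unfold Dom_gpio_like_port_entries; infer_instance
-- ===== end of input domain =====

-- B builds the eight entries columnar (parallel per-field lists zipped with the
-- key tuple) instead of A's row-wise loop plus two special appends; alternative
-- decomposition, same output and cost.


-- ===== PORT A =====
-- sv_id: per-character map; Char.isAlphanum matches Python str.isalnum on the ASCII domain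
def pvSvChar (ch : Char) : Char :=
  if ch.isAlphanum || ch = '_' || ch = '$' || ch = '[' || ch = ']' then ch else '_'

def pvSvId (s : String) : String := String.ofList (s.toList.map pvSvChar)

def pvGpioBool : List String := ["oen", "i", "pe_pu", "ps_pd", "st", "ie"]

def gpio_like_port_entries (base : String) (width : Int) : List (List (String × String)) :=
  let b := pvSvId base
  let ent := pvGpioBool.foldl (fun acc nm =>
    acc ++ [[("direction", "input"), ("type", "logic"),
             ("bits", if width ≤ 1 then "" else "[" ++ PySem.Int.toStr (width - 1) ++ ":0]"),
             ("name", b ++ "_" ++ nm), ("array", ""), ("iface", "")]]) []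
  let ent := ent ++ [[("direction", "input"), ("type", "logic"),
             ("bits", (if width ≤ 1 then "" else "[" ++ PySem.Int.toStr (width - 1) ++ ":0]") ++ "[3:0]"),
             ("name", b ++ "_ds"), ("array", ""), ("iface", "")]]
  let ent := ent ++ [[("direction", "output"), ("type", "logic"),
             ("bits", if width ≤ 1 then "" else "[" ++ PySem.Int.toStr (width - 1) ++ ":0]"),
             ("name", b ++ "_c"), ("array", ""), ("iface", "")]]
  ent

-- ===== PORT B =====
def pvKeys : List String := ["direction", "type", "bits", "name", "array", "iface"]

def pvSuffixes : List String := ["oen", "i", "pe_pu", "ps_pd", "st", "ie", "ds", "c"]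

def gpio_like_port_entries_alt (base : String) (width : Int) : List (List (String × String)) :=
  let b := String.ofList (base.toList.map pvSvChar)
  let bits := if width ≤ 1 then "" else "[" ++ PySem.Int.toStr (width - 1) ++ ":0]"
  let directions := List.replicate 7 "input" ++ ["output"]
  let bitsCol := List.replicate 6 bits ++ [bits ++ "[3:0]", bits]
  let names := pvSuffixes.map (fun s => b ++ "_" ++ s)
  (directions.zip (bitsCol.zip names)).map (fun r =>
    pvKeys.zip [r.1, "logic", r.2.1, r.2.2, "", ""])

-- ===== PRECONDITION & SPEC =====
def Spec_gpio_like_port_entries (base : String) (width : Int) (out : List (List (String × String))) : Prop := out = gpio_like_port_entries_alt base width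
instance (base : String) (width : Int) (out : List (List (String × String))) : Decidable (Spec_gpio_like_port_entries base width out) := by unfold Spec_gpio_like_port_entries; infer_instance

-- ===== CLAIM (what is proved, stated in full; the proofs are below) =====
def Claim_equal_gpio_like_port_entries : Prop := ∀ (base : String) (width : Int), Dom_gpio_like_port_entries base width → Spec_gpio_like_port_entries base width (gpio_like_port_entries base width)

-- ===== LEMMAS AND PROOFS =====

-- ===== VERDICT (by name: the statement is the Claim_ definition above) =====
theorem gpio_like_port_entries_spec : Claim_equal_gpio_like_port_entries := by
  intro base width _
  unfold Spec_gpio_like_port_entries gpio_like_port_entries gpio_like_port_entries_alt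
  simp [pvGpioBool, pvSuffixes, pvKeys, pvSvId, List.foldl, List.map, List.zip,
    List.replicate, List.zipWith]
  constructor <;> rw [String.append_assoc] <;> rfl
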